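-- pv_equiv track=rewrite | github.com/Cybertwip/xbaxer | main.py | _is_windows_safe_relpath
-- ===== SOURCE A (Python) =====
-- def _is_windows_safe_relpath(rel_path):
--     invalid_chars = set('<>:"|?*')
--     reserved_names = {
--         "con", "prn", "aux", "nul",
--         "com1", "com2", "com3", "com4", "com5", "com6", "com7", "com8", "com9",
--         "lpt1", "lpt2", "lpt3", "lpt4", "lpt5", "lpt6", "lpt7", "lpt8", "lpt9",
--     }
--
--     for part in rel_path.replace("\\", "/").split("/"):
--         if not part:
--             continue
--         if any(ch in invalid_chars for ch in part):
--             return False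
--         if part.endswith((" ", ".")):
--             return False
--         stem = part.rstrip(" .").split(".", 1)[0].lower()
--         if stem in reserved_names:
--             return False
--     return True
-- ===== SOURCE B (Python) =====
-- def _is_windows_safe_relpath(rel_path):
--     # Single pass over the characters with O(1) extra state: no replace/split,
--     # no per-part rescans.  For each segment we keep only: whether an invalid
--     # char was seen, the last char, and the first <=5 chars before the first
--     # dot (reserved device names have at most 4 chars, so 5 chars decide it).
--     reserved = {
--         "con", "prn", "aux", "nul",
--         "com1", "com2", "com3", "com4", "com5", "com6", "com7", "com8", "com9",
--         "lpt1", "lpt2", "lpt3", "lpt4", "lpt5", "lpt6", "lpt7", "lpt8", "lpt9",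
--     }
--     invalid = set('<>:"|?*')
--     stem, seen_dot, last, bad = "", False, None, False
--     for ch in rel_path:
--         if ch == "/" or ch == "\\":
--             if last is not None and (bad or last in " ." or stem.lower() in reserved):
--                 return False
--             stem, seen_dot, last, bad = "", False, None, False
--         else:
--             if ch in invalid:
--                 bad = True
--             if ch == ".":
--                 seen_dot = True
--             elif not seen_dot and len(stem) < 5:
--                 stem += ch
--             last = ch
--     return last is None or not (bad or last in " ." or stem.lower() in reserved)
-- ===== Notes on version B (the rewrite author's own statement) =====
-- stated objective: alternative
-- what changed: B replaces A's replace/split into parts plus per-part rescans (char scan, endswith, rstrip/split/lower stem rebuild) by a single left-to-right character pass that keeps O(1) state per segment: an invalid-char flag, the last character, and the first five characters before the first dot, checked at each separator.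
import Mathlib
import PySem

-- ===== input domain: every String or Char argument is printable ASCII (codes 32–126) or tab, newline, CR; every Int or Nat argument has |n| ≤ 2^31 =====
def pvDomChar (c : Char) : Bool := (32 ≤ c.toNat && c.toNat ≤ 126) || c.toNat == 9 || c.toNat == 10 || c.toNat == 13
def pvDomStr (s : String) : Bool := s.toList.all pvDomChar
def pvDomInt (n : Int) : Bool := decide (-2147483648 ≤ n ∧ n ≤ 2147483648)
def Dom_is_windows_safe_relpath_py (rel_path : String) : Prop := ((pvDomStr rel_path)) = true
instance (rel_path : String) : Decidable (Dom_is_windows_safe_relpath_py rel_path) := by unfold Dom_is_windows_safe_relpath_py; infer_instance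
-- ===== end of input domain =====

-- B replaces A's replace/split + per-part rescans by one character pass with O(1) extra state
-- (invalid-flag, last char, first ≤5 chars of the pre-dot stem); objective: alternative (one pass).

-- ===== PORT A =====
-- set('<>:"|?*')
def pvInvalid : List Char := PySem.Set.ofList "<>:\"|?*".toList
-- the reserved_names set literal, as a list of distinct char lists
def pvReserved : List (List Char) :=
  [['c','o','n'], ['p','r','n'], ['a','u','x'], ['n','u','l'],
   ['c','o','m','1'], ['c','o','m','2'], ['c','o','m','3'], ['c','o','m','4'], ['c','o','m','5'],
   ['c','o','m','6'], ['c','o','m','7'], ['c','o','m','8'], ['c','o','m','9'],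
   ['l','p','t','1'], ['l','p','t','2'], ['l','p','t','3'], ['l','p','t','4'], ['l','p','t','5'],
   ['l','p','t','6'], ['l','p','t','7'], ['l','p','t','8'], ['l','p','t','9']]
-- part.rstrip(" .")  — hand port, exact: drop trailing chars that are ' ' or '.'
def aRstrip (p : List Char) : List Char :=
  ((p.reverse).dropWhile (fun c => c == ' ' || c == '.')).reverse
-- part.rstrip(" .").split(".", 1)[0].lower()  ([0] of a split result always exists)
def aStem (p : List Char) : List Char :=
  PySem.Chars.lower ((PySem.Chars.splitOnMax (aRstrip p) ['.'] 1).headD [])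
-- the for-loop over the parts, with A's early returns
def aLoop : List (List Char) → Bool
  | [] => true
  | p :: rest =>
    if p.isEmpty then aLoop rest
    else if p.any (fun c => pvInvalid.contains c) then false
    else if PySem.Chars.endswith p [' '] || PySem.Chars.endswith p ['.'] then false
    else if pvReserved.contains (aStem p) then false
    else aLoop rest

def is_windows_safe_relpath_py (rel_path : String) : Bool :=
  aLoop (PySem.Chars.splitOn (PySem.Chars.replace rel_path.toList ['\\'] ['/']) ['/'])

-- ===== PORT B =====
-- bad or last in " ." or stem.lower() in reserved   (last in " ." on a single char = equality test)
def bFlushBad (stem : List Char) (last : Char) (bad : Bool) : Bool :=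
  bad || last == ' ' || last == '.' || pvReserved.contains (PySem.Chars.lower stem)
-- the single for-loop of Source B: state = (stem, seen_dot, last, bad); None = no char in segment yet
def bGo : List Char → List Char → Bool → Option Char → Bool → Bool
  | [], stem, _, last?, bad =>
    match last? with
    | none => true
    | some l => !(bFlushBad stem l bad)
  | c :: cs, stem, dot, last?, bad =>
    if c == '/' || c == '\\' then
      match last? with
      | some l => if bFlushBad stem l bad then false else bGo cs [] false none false
      | none => bGo cs [] false none false
    else
      bGo cs
        (if c == '.' then stem else if !dot && stem.length < 5 then stem ++ [c] else stem)
        (dot || c == '.')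
        (some c)
        (bad || pvInvalid.contains c)

def is_windows_safe_relpath_py_alt (rel_path : String) : Bool :=
  bGo rel_path.toList [] false none false

-- ===== PRECONDITION & SPEC =====
def Spec_is_windows_safe_relpath_py (rel_path : String) (out : Bool) : Prop := out = is_windows_safe_relpath_py_alt rel_path
instance (rel_path : String) (out : Bool) : Decidable (Spec_is_windows_safe_relpath_py rel_path out) := by unfold Spec_is_windows_safe_relpath_py; infer_instance

-- ===== CLAIM (what is proved, stated in full; the proofs are below) =====
def Claim_equal_is_windows_safe_relpath_py : Prop := ∀ (rel_path : String), Dom_is_windows_safe_relpath_py rel_path → Spec_is_windows_safe_relpath_py rel_path (is_windows_safe_relpath_py rel_path)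

-- ===== LEMMAS AND PROOFS =====

-- reference splitting combinators used only by the proofs
def glue (pre : List Char) : List (List Char) → List (List Char)
  | [] => [pre]
  | p :: ps => (pre ++ p) :: ps

-- split on a single char, full
def splitC (sc : Char) : List Char → List (List Char)
  | [] => [[]]
  | c :: t => if c == sc then [] :: splitC sc t else glue [c] (splitC sc t)

-- split on a single char, at most once
def split1 (sc : Char) : List Char → List (List Char)
  | [] => [[]]
  | c :: t => if c == sc then [[], t] else glue [c] (split1 sc t)

-- split on '/' or '\'
def split2 : List Char → List (List Char)
  | [] => [[]]
  | c :: t => if c == '/' || c == '\\' then [] :: split2 t else glue [c] (split2 t)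

def normC (c : Char) : Char := if c == '\\' then '/' else c

theorem glue_assoc (a b : List Char) (l : List (List Char)) :
    glue (a ++ b) l = glue a (glue b l) := by
  cases l <;> simp [glue]

theorem splitC_ne_nil (sc : Char) (l : List Char) : splitC sc l ≠ [] := by
  cases l with
  | nil => simp [splitC]
  | cons c t =>
    simp only [splitC]
    split
    · simp
    · cases h : splitC sc t <;> simp [glue]

theorem split1_ne_nil (sc : Char) (l : List Char) : split1 sc l ≠ [] := by
  cases l with
  | nil => simp [split1]
  | cons c t =>
    simp only [split1]
    split
    · simp
    · cases h : split1 sc t <;> simp [glue]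

theorem split2_ne_nil (l : List Char) : split2 l ≠ [] := by
  cases l with
  | nil => simp [split2]
  | cons c t =>
    simp only [split2]
    split
    · simp
    · cases h : split2 t <;> simp [glue]

theorem glue_nil {l : List (List Char)} (h : l ≠ []) : glue [] l = l := by
  cases l with
  | nil => exact absurd rfl h
  | cons p ps => simp [glue]

theorem replace_go_spec (fuel : Nat) (l acc : List Char) (h : l.length ≤ fuel) :
    PySem.Chars.replace.go ['\\'] ['/'] fuel l acc = acc.reverse ++ l.map normC := by
  induction fuel generalizing l acc with
  | zero =>
    have : l = [] := List.eq_nil_of_length_eq_zero (Nat.le_zero.mp h)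
    subst this; simp [PySem.Chars.replace.go]
  | succ n ih =>
    cases l with
    | nil => simp [PySem.Chars.replace.go]
    | cons c t =>
      simp only [PySem.Chars.replace.go]
      by_cases hc : c = '\\'
      · subst hc
        rw [if_pos (by simp [List.isPrefixOf])]
        simp only [List.length_singleton, List.drop_one, List.tail_cons]
        rw [ih t _ (by simpa using h)]
        simp [normC]
      · rw [if_neg (by simp [List.isPrefixOf]; exact fun hh => hc hh.symm)]
        rw [ih t _ (by simpa using h)]
        simp [normC, hc]

theorem replace_spec (s : List Char) :
    PySem.Chars.replace s ['\\'] ['/'] = s.map normC := by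
  simp only [PySem.Chars.replace, List.isEmpty_cons]
  simpa using replace_go_spec s.length s [] le_rfl

theorem splitOn_go_spec (sc : Char) (fuel : Nat) (l cur : List Char)
    (acc : List (List Char)) (h : l.length ≤ fuel) :
    PySem.Chars.splitOn.go [sc] fuel l cur acc
      = acc.reverse ++ glue cur.reverse (splitC sc l) := by
  induction fuel generalizing l cur acc with
  | zero =>
    have : l = [] := List.eq_nil_of_length_eq_zero (Nat.le_zero.mp h)
    subst this; simp [PySem.Chars.splitOn.go, splitC, glue]
  | succ n ih =>
    cases l with
    | nil => simp [PySem.Chars.splitOn.go, splitC, glue]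
    | cons c t =>
      simp only [PySem.Chars.splitOn.go]
      by_cases hc : c = sc
      · subst hc
        rw [if_pos (by simp [List.isPrefixOf])]
        simp only [List.length_singleton, List.drop_one, List.tail_cons]
        rw [ih t [] _ (by simpa using h)]
        simp [splitC, glue]
        cases hq : splitC c t with
        | nil => exact absurd hq (splitC_ne_nil c t)
        | cons p ps => rfl
      · rw [if_neg (by simp [List.isPrefixOf]; exact fun hh => hc hh.symm)]
        rw [ih t (c :: cur) acc (by simpa using h)]
        have hc' : (c == sc) = false := by simpa using hc
        simp only [splitC, hc', Bool.false_eq_true, if_false]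
        rw [List.reverse_cons, glue_assoc]

theorem splitOn_spec (sc : Char) (s : List Char) :
    PySem.Chars.splitOn s [sc] = splitC sc s := by
  simp only [PySem.Chars.splitOn]
  rw [splitOn_go_spec sc (s.length + 1) s [] [] (by omega)]
  simp [glue_nil (splitC_ne_nil sc s)]

theorem splitOnMax_go_zero (sc : Char) (fuel : Nat) (l cur : List Char) (acc : List (List Char)) :
    PySem.Chars.splitOnMax.go [sc] fuel 0 l cur acc = ((cur.reverse ++ l) :: acc).reverse := by
  cases fuel with
  | zero => simp [PySem.Chars.splitOnMax.go]
  | succ n => cases l <;> simp [PySem.Chars.splitOnMax.go]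

theorem splitOnMax_go_one (sc : Char) (fuel : Nat) (l cur : List Char)
    (acc : List (List Char)) (h : l.length ≤ fuel) :
    PySem.Chars.splitOnMax.go [sc] fuel 1 l cur acc
      = acc.reverse ++ glue cur.reverse (split1 sc l) := by
  induction fuel generalizing l cur acc with
  | zero =>
    have : l = [] := List.eq_nil_of_length_eq_zero (Nat.le_zero.mp h)
    subst this; simp [PySem.Chars.splitOnMax.go, split1, glue]
  | succ n ih =>
    cases l with
    | nil => simp [PySem.Chars.splitOnMax.go, split1, glue]
    | cons c t =>
      simp only [PySem.Chars.splitOnMax.go]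
      rw [if_neg (by omega)]
      by_cases hc : c = sc
      · subst hc
        rw [if_pos (by simp [List.isPrefixOf])]
        simp only [List.length_singleton, List.drop_one, List.tail_cons]
        rw [splitOnMax_go_zero]
        simp [split1, glue]
      · rw [if_neg (by simp [List.isPrefixOf]; exact fun hh => hc hh.symm)]
        rw [ih t (c :: cur) acc (by simpa using h)]
        have hc' : (c == sc) = false := by simpa using hc
        simp only [split1, hc', Bool.false_eq_true, if_false]
        rw [List.reverse_cons, glue_assoc]

theorem head_split1 (sc : Char) (l : List Char) :
    (split1 sc l).headD [] = l.takeWhile (fun c => !(c == sc)) := by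
  induction l with
  | nil => simp [split1]
  | cons c t ih =>
    simp only [split1, List.takeWhile_cons]
    by_cases hc : c = sc
    · simp [hc]
    · have hc' : (c == sc) = false := by simpa using hc
      simp only [hc', Bool.false_eq_true, if_false, Bool.not_false, if_true]
      cases h : split1 sc t with
      | nil => exact absurd h (split1_ne_nil sc t)
      | cons p ps => simp [glue, ← ih, h]

theorem splitC_map_norm (l : List Char) : splitC '/' (l.map normC) = split2 l := by
  induction l with
  | nil => simp [splitC, split2]
  | cons c t ih =>
    simp only [List.map_cons, splitC, split2]
    by_cases hs : c = '/' ∨ c = '\\'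
    · have h1 : normC c = '/' := by rcases hs with h | h <;> simp [normC, h]
      rw [if_pos (by simp [h1]), if_pos (by rcases hs with h | h <;> simp [h]), ih]
    · push Not at hs
      have h1 : normC c = c := by simp [normC, hs.2]
      rw [h1, if_neg (by simp [hs.1]), if_neg (by simp [hs.1, hs.2]), ih]

-- A's per-part check, and B's per-segment check
def aPartOK (p : List Char) : Bool :=
  if p.isEmpty then true
  else if p.any (fun c => pvInvalid.contains c) then false
  else if PySem.Chars.endswith p [' '] || PySem.Chars.endswith p ['.'] then false
  else if pvReserved.contains (aStem p) then false
  else true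

def bSegOK (p : List Char) : Bool :=
  match p.getLast? with
  | none => true
  | some l =>
    !(bFlushBad ((p.takeWhile (fun c => !(c == '.'))).take 5) l (p.any (fun c => pvInvalid.contains c)))

theorem aLoop_all (ps : List (List Char)) : aLoop ps = ps.all aPartOK := by
  induction ps with
  | nil => simp [aLoop]
  | cons p rest ih =>
    simp only [aLoop, List.all_cons, aPartOK]
    split_ifs <;> simp [ih]

theorem endswith_singleton (p : List Char) (c : Char) :
    PySem.Chars.endswith p [c] = true ↔ p.getLast? = some c := by
  rw [PySem.Chars.endswith_iff, List.getLast?_eq_some_iff]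
  constructor
  · rintro ⟨t, rfl⟩; exact ⟨t, rfl⟩
  · rintro ⟨t, rfl⟩; exact ⟨t, rfl⟩

theorem reserved_short (x : List Char) (h : 4 < x.length) : pvReserved.contains x = false := by
  rw [← Bool.not_eq_true, List.contains_iff_mem]
  intro hx
  simp only [pvReserved, List.mem_cons, List.not_mem_nil, or_false] at hx
  rcases hx with rfl|rfl|rfl|rfl|rfl|rfl|rfl|rfl|rfl|rfl|rfl|rfl|rfl|rfl|rfl|rfl|rfl|rfl|rfl|rfl|rfl|rfl <;> simp at h

theorem aStem_clean (t : List Char) (l : Char)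
    (hs : (l == ' ' || l == '.') = false) :
    aStem (t ++ [l]) = PySem.Chars.lower ((t ++ [l]).takeWhile (fun c => !(c == '.'))) := by
  have hr : aRstrip (t ++ [l]) = t ++ [l] := by
    simp only [aRstrip, List.reverse_append, List.reverse_singleton, List.singleton_append,
      List.dropWhile_cons, hs, Bool.false_eq_true, if_false]
    simp
  simp only [aStem, hr, PySem.Chars.splitOnMax]
  rw [if_neg (by omega)]
  have h1 : (1 : Int).toNat = 1 := rfl
  rw [h1, splitOnMax_go_one '.' ((t ++ [l]).length + 1) (t ++ [l]) [] [] (by omega)]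
  simp only [List.reverse_nil, List.nil_append]
  rw [glue_nil (split1_ne_nil '.' (t ++ [l])), head_split1]

theorem part_ok_eq (p : List Char) : aPartOK p = bSegOK p := by
  cases hL : p.getLast? with
  | none =>
    have : p = [] := List.getLast?_eq_none_iff.mp hL
    subst this; simp [aPartOK, bSegOK]
  | some l =>
    obtain ⟨t, rfl⟩ := List.getLast?_eq_some_iff.mp hL
    unfold aPartOK bSegOK
    rw [hL]
    rw [if_neg (by simp)]
    simp only [bFlushBad]
    by_cases hinv : ((t ++ [l]).any fun c => pvInvalid.contains c) = true
    · rw [if_pos hinv, hinv]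
      simp
    · rw [if_neg hinv]
      have hinv' : ((t ++ [l]).any fun c => pvInvalid.contains c) = false := by
        simpa using hinv
      rw [hinv']
      by_cases hl1 : l = ' '
      · rw [if_pos (by simp only [Bool.or_eq_true, endswith_singleton, hL, Option.some.injEq]; exact Or.inl hl1)]
        simp [hl1]
      by_cases hl2 : l = '.'
      · rw [if_pos (by simp only [Bool.or_eq_true, endswith_singleton, hL, Option.some.injEq]; exact Or.inr hl2)]
        simp [hl2]
      rw [if_neg (by
        simp only [Bool.or_eq_true, endswith_singleton, hL, Option.some.injEq]
        push Not
        exact ⟨fun h => hl1 h, fun h => hl2 h⟩)]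
      have hsp : (l == ' ' || l == '.') = false := by simp [hl1, hl2]
      rw [aStem_clean t l hsp]
      have he1 : (l == ' ') = false := by simp [hl1]
      have he2 : (l == '.') = false := by simp [hl2]
      simp only [he1, he2, Bool.or_false, Bool.false_or]
      set w := (t ++ [l]).takeWhile (fun c => !(c == '.')) with hw
      by_cases hlen : w.length ≤ 5
      · rw [List.take_of_length_le hlen]
        cases h : pvReserved.contains (PySem.Chars.lower w) <;> simp_all
      · have h5 : pvReserved.contains (PySem.Chars.lower w) = false := by
          apply reserved_short; simp only [PySem.Chars.lower, List.length_map]; omega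
        have h5' : pvReserved.contains (PySem.Chars.lower (w.take 5)) = false := by
          apply reserved_short
          simp only [PySem.Chars.lower, List.length_map, List.length_take]
          omega
        rw [h5, h5']
        simp

-- the B-side loop invariant: the state is a function of the current segment seg
theorem bGo_inv (cs : List Char) (seg : List Char) :
    bGo cs ((seg.takeWhile (fun c => !(c == '.'))).take 5)
      (seg.any (fun c => c == '.')) seg.getLast?
      (seg.any (fun c => pvInvalid.contains c))
      = (glue seg (split2 cs)).all bSegOK := by
  induction cs generalizing seg with
  | nil =>
    have hg : glue seg (split2 []) = [seg] := by simp [split2, glue]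
    rw [hg]
    cases hL : seg.getLast? with
    | none =>
      have : seg = [] := List.getLast?_eq_none_iff.mp hL
      subst this; simp [bGo, bSegOK]
    | some l => simp [bGo, bSegOK, hL]
  | cons c cs ih =>
    by_cases hs : (c == '/' || c == '\\') = true
    · have hsplit : split2 (c :: cs) = [] :: split2 cs := by
        simp only [split2]; rw [if_pos hs]
      have hglue : glue seg ([] :: split2 cs) = seg :: split2 cs := by simp [glue]
      rw [hsplit, hglue, List.all_cons]
      have ih0 := ih []
      simp only [List.takeWhile_nil, List.take_nil, List.any_nil, List.getLast?_nil] at ih0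
      rw [glue_nil (split2_ne_nil cs)] at ih0
      cases hL : seg.getLast? with
      | none =>
        have : seg = [] := List.getLast?_eq_none_iff.mp hL
        subst this
        simp only [bGo]
        rw [if_pos hs]
        simp [ih0, bSegOK]
      | some l =>
        simp only [bGo]
        rw [if_pos hs]
        simp only [ih0, bSegOK, hL]
        by_cases hf : bFlushBad ((seg.takeWhile (fun c => !(c == '.'))).take 5) l
            (seg.any (fun c => pvInvalid.contains c)) = true
        · simp_all
        · simp only [Bool.not_eq_true] at hf; simp_all
    · -- ordinary character: the state advances to that of seg ++ [c]
      have hsplit : split2 (c :: cs) = glue [c] (split2 cs) := by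
        simp only [split2]
        have hs' : (c == '/' || c == '\\') = false := by simpa using hs
        rw [hs']
        simp
      rw [hsplit, ← glue_assoc]
      have key : ∀ (st : List Char) (dt bd : Bool),
          st = ((seg ++ [c]).takeWhile (fun x => !(x == '.'))).take 5 →
          dt = (seg ++ [c]).any (fun x => x == '.') →
          bd = (seg ++ [c]).any (fun x => pvInvalid.contains x) →
          bGo cs st dt (some c) bd = (glue (seg ++ [c]) (split2 cs)).all bSegOK := by
        rintro _ _ _ rfl rfl rfl
        rw [← List.getLast?_concat (l := seg) (a := c)]
        exact ih (seg ++ [c])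
      simp only [bGo]
      rw [if_neg (by simpa using hs)]
      apply key
      · -- the stem update
        have hlt : (seg.any fun x => x == '.') = true →
            ¬((seg.takeWhile (fun x => !(x == '.'))).length = seg.length) := by
          intro hdot hgeq
          rcases List.any_eq_true.mp hdot with ⟨d, hd, hd'⟩
          have heq : seg.takeWhile (fun x => !(x == '.')) = seg :=
            (List.takeWhile_sublist _).eq_of_length_le (le_of_eq hgeq.symm)
          have h2 := List.takeWhile_eq_self_iff.mp heq d hd
          rw [beq_iff_eq.mp hd'] at h2
          simp at h2
        have hselfOf : (seg.any fun x => x == '.') = false →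
            seg.takeWhile (fun x => !(x == '.')) = seg := by
          intro hdot'
          refine List.takeWhile_eq_self_iff.mpr ?_
          intro x hx
          have := List.any_eq_false.mp hdot' x hx
          simpa using this
        by_cases hc' : c = '.'
        · subst hc'
          simp only [beq_self_eq_true, if_true]
          cases hdot : (seg.any fun x => x == '.') with
          | true =>
            rw [List.takeWhile_append, if_neg (hlt hdot)]
          | false =>
            have hself := hselfOf hdot
            rw [List.takeWhile_append, if_pos (show (List.takeWhile (fun x => !(x == '.')) seg).length = seg.length from by rw [hself]), hself]
            simp
        · have hcb : (c == '.') = false := by simpa using hc'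
          simp only [hcb, Bool.false_eq_true, if_false]
          cases hdot : (seg.any fun x => x == '.') with
          | true =>
            simp only [Bool.not_true, Bool.false_and, Bool.false_eq_true, if_false]
            rw [List.takeWhile_append, if_neg (hlt hdot)]
          | false =>
            have hself := hselfOf hdot
            rw [List.takeWhile_append, if_pos (show (List.takeWhile (fun x => !(x == '.')) seg).length = seg.length from by rw [hself]), hself]
            simp only [List.takeWhile_cons, hcb, Bool.not_false, if_true, List.takeWhile_nil,
              Bool.true_and]
            by_cases hlen : seg.length < 5
            · have hcnd : decide ((List.take 5 (List.takeWhile (fun x => !(x == '.')) seg)).length < 5) = true := by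
                rw [hself]
                simp only [List.length_take, decide_eq_true_eq]
                omega
              rw [hself] at hcnd
              simp only [hcnd, if_true]
              rw [List.take_of_length_le (Nat.le_of_lt hlen),
                  List.take_of_length_le (show (seg ++ [c]).length ≤ 5 by simp; omega)]
            · have hcnd : decide ((List.take 5 seg).length < 5) = false := by
                simp only [List.length_take, decide_eq_false_iff_not]
                omega
              simp only [hcnd, Bool.false_eq_true, if_false]
              rw [List.take_append_of_le_length (by omega)]
      · simp
      · simp

-- ===== VERDICT (by name: the statement is the Claim_ definition above) =====
theorem is_windows_safe_relpath_py_spec : Claim_equal_is_windows_safe_relpath_py := by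
  intro s _
  unfold Spec_is_windows_safe_relpath_py is_windows_safe_relpath_py is_windows_safe_relpath_py_alt
  rw [replace_spec, splitOn_spec, splitC_map_norm, aLoop_all]
  have hb := bGo_inv s.toList []
  simp only [List.takeWhile_nil, List.take_nil, List.any_nil, List.getLast?_nil] at hb
  rw [hb, glue_nil (split2_ne_nil s.toList)]
  exact List.all_congr rfl (fun p => part_ok_eq p)
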